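-- pv_equiv track=rewrite | github.com/robjohncolson/doge-grid-bot | kraken_client.py | _normalize_pair
-- ===== SOURCE A (Python) =====
-- def _normalize_pair(pair: str) -> str:
--     """Strip Kraken's X/Z prefixes for normalized comparison.
--
--     Kraken prepends X to crypto and Z to fiat in some response keys:
--     e.g. XXDGZUSD for XDG/USD, XETHZUSD for ETH/USD.
--     We strip a leading X from the base and leading Z from the quote
--     to get a canonical form for matching.
--     """
--     p = pair.upper()
--     # Known fiat suffixes (Kraken prepends Z)
--     for fiat in ("ZUSD", "ZEUR", "ZGBP", "ZJPY", "ZCAD", "ZAUD"):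
--         if p.endswith(fiat):
--             base = p[:-len(fiat)]
--             quote = fiat[1:]  # strip Z
--             if base.startswith("X") and len(base) > 1:
--                 base = base[1:]  # strip X prefix from crypto
--             return base + quote
--     # No known fiat suffix -- just strip leading X if present
--     if p.startswith("X") and len(p) > 3:
--         p = p[1:]
--     return p
-- ===== SOURCE B (Python) =====
-- _ZFIATS = {"ZUSD", "ZEUR", "ZGBP", "ZJPY", "ZCAD", "ZAUD"}
--
--
-- def _normalize_pair(pair: str) -> str:
--     """Normalize by computing the set of character positions to delete,
--     then emitting the string in one filtered pass (no slice concatenation)."""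
--     p = pair.upper()
--     n = len(p)
--     drop = set()
--     if n >= 4 and p[n - 4:] in _ZFIATS:
--         drop.add(n - 4)                    # delete the Z of the quote
--         if p[0] == "X" and n - 4 > 1:      # delete the X prefix of the base
--             drop.add(0)
--     elif n > 3 and p[0] == "X":
--         drop.add(0)
--     return "".join(c for i, c in enumerate(p) if i not in drop)
-- ===== Notes on version B (the rewrite author's own statement) =====
-- stated objective: alternative
-- what changed: A slices and concatenates substrings inside an early-return loop over six suffixes; B instead computes a set of character indices to delete (the quote's Z and possibly the leading X) and emits the result in one filtered pass over enumerate(p), never concatenating slices.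
import Mathlib
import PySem

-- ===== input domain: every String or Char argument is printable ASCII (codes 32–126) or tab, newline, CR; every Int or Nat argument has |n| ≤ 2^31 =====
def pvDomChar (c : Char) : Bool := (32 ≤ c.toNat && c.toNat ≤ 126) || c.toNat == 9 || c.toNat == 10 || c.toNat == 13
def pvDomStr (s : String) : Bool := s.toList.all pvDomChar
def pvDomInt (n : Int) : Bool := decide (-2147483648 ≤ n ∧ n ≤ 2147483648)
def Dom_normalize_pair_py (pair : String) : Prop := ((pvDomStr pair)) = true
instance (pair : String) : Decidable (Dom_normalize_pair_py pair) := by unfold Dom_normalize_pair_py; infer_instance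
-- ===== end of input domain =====

-- B replaces A's early-return suffix loop with slice concatenation by a drop-index set
-- plus one filtered pass over the enumerated string (alternative; same behaviour).

-- ===== PORT A =====
-- the tuple of known fiat suffixes the Python loop iterates over
def pvFiatsA : List (List Char) :=
  [['Z','U','S','D'], ['Z','E','U','R'], ['Z','G','B','P'],
   ['Z','J','P','Y'], ['Z','C','A','D'], ['Z','A','U','D']]

-- the 'for fiat in (...)' loop with its early return, then the post-loop fallback
def pvLoopA (p : List Char) : List (List Char) → List Char
  | [] =>
    if PySem.Chars.startswith p ['X'] && decide (3 < p.length) then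
      PySem.List.slice p (some 1) none
    else p
  | fiat :: rest =>
    if PySem.Chars.endswith p fiat then
      let base := PySem.List.slice p none (some (-(fiat.length : Int)))
      let quote := PySem.List.slice fiat (some 1) none
      let base' := if PySem.Chars.startswith base ['X'] && decide (1 < base.length) then
          PySem.List.slice base (some 1) none
        else base
      base' ++ quote
    else pvLoopA p rest

def normalize_pair_py (pair : String) : String :=
  String.ofList (pvLoopA (PySem.Chars.upper pair.toList) pvFiatsA)

-- ===== PORT B =====
-- the set literal _ZFIATS of Source B
def pvZFiats : PySem.Set (List Char) :=
  PySem.Set.ofList [['Z','U','S','D'], ['Z','E','U','R'], ['Z','G','B','P'],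
                    ['Z','J','P','Y'], ['Z','C','A','D'], ['Z','A','U','D']]

-- ''.join(c for i, c in enumerate(p) if i not in drop), as the obvious recursion
-- over the characters carrying the running index
def pvJoinB (drop : PySem.Set Int) : Nat → List Char → List Char
  | _, [] => []
  | i, c :: rest =>
    if PySem.Set.contains drop (i : Int) then pvJoinB drop (i + 1) rest
    else c :: pvJoinB drop (i + 1) rest

def pvCoreB (p : List Char) : List Char :=
  let n : Int := p.length
  let drop : PySem.Set Int :=
    if decide (4 ≤ n) && PySem.Set.contains pvZFiats (PySem.List.slice p (some (n - 4)) none) then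
      let d0 := PySem.Set.add PySem.Set.empty (n - 4)
      if (PySem.List.pyGet? p 0 == some 'X') && decide (1 < n - 4) then
        PySem.Set.add d0 0
      else d0
    else if decide (3 < n) && (PySem.List.pyGet? p 0 == some 'X') then
      PySem.Set.add PySem.Set.empty 0
    else PySem.Set.empty
  pvJoinB drop 0 p

def normalize_pair_py_alt (pair : String) : String :=
  String.ofList (pvCoreB (PySem.Chars.upper pair.toList))

-- ===== PRECONDITION & SPEC =====
def Spec_normalize_pair_py (pair : String) (out : String) : Prop := out = normalize_pair_py_alt pair
instance (pair : String) (out : String) : Decidable (Spec_normalize_pair_py pair out) := by unfold Spec_normalize_pair_py; infer_instance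

-- ===== CLAIM =====
def Claim_equal_normalize_pair_py : Prop := ∀ (pair : String), Dom_normalize_pair_py pair → Spec_normalize_pair_py pair (normalize_pair_py pair)

-- ===== LEMMAS AND PROOFS =====

-- pvJoinB deletes nothing when the drop set never hits an index ≥ i
theorem pvJoinB_id (D : PySem.Set Int) (l : List Char) (i : Nat)
    (h : ∀ j : Int, (i : Int) ≤ j → j ∉ D) :
    pvJoinB D i l = l := by
  induction l generalizing i with
  | nil => rfl
  | cons c rest ih =>
    simp [pvJoinB, h (i : Int) le_rfl,
      ih (i + 1) (fun j hj => h j (by push_cast at hj ⊢; omega))]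

-- pvJoinB on s ++ [a,b,c,d] deletes exactly the position of 'a' when the drop set
-- holds i + s.length and nothing else at index ≥ i
theorem pvJoinB_dropZ (D : PySem.Set Int) (a b c d : Char) (s : List Char) (i : Nat)
    (h0 : ∀ j : Int, (i : Int) ≤ j → j ≠ (i : Int) + s.length → j ∉ D)
    (h1 : ((i : Int) + (s.length : Int)) ∈ D) :
    pvJoinB D i (s ++ [a, b, c, d]) = s ++ [b, c, d] := by
  induction s generalizing i with
  | nil =>
    have hin : ((i : Int)) ∈ D := by simpa using h1
    have e1 : ((i : Int) + 1) ∉ D := h0 _ (by omega) (by simp)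
    have e2 : ((i : Int) + 1 + 1) ∉ D := h0 _ (by omega) (by simp; omega)
    have e3 : ((i : Int) + 1 + 1 + 1) ∉ D := h0 _ (by omega) (by simp; omega)
    simp [pvJoinB, hin, e1, e2, e3]
  | cons x s ih =>
    have hx : ((i : Int)) ∉ D := h0 _ le_rfl (by push_cast [List.length_cons]; omega)
    have h1' : ((i + 1 : Nat) : Int) + (s.length : Int) ∈ D := by
      rw [show (((i + 1 : Nat)) : Int) + (s.length : Int)
          = (i : Int) + ((x :: s).length : Int) from by push_cast [List.length_cons]; ring]
      exact h1
    have h0' : ∀ j : Int, ((i + 1 : Nat) : Int) ≤ j → j ≠ ((i + 1 : Nat) : Int) + s.length → j ∉ D :=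
      fun j hj hne => h0 j (by push_cast at hj ⊢; omega)
        (by push_cast [List.length_cons] at hne ⊢; omega)
    simp [pvJoinB, hx, ih (i + 1) h0' h1']

-- membership in the concrete drop sets
theorem pv_mem_single (m x : Int) :
    x ∈ (PySem.Set.add PySem.Set.empty m : PySem.Set Int) ↔ x = m := by
  simp [PySem.Set.add, PySem.Set.empty, PySem.Set.contains]

theorem pv_mem_double (m x : Int) (hm : m ≠ 0) :
    x ∈ (PySem.Set.add (PySem.Set.add PySem.Set.empty m) 0 : PySem.Set Int) ↔ (x = m ∨ x = 0) := by
  simp [PySem.Set.add, PySem.Set.empty, PySem.Set.contains, Ne.symm hm]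

-- endswith against a four-char pattern, on a list whose last four chars are explicit
theorem pv_ends4 (s : List Char) (a b c d w x y z : Char) :
    PySem.Chars.endswith (s ++ [a,b,c,d]) [w,x,y,z] = ([a,b,c,d] == [w,x,y,z]) := by
  rcases Bool.eq_false_or_eq_true (PySem.Chars.endswith (s ++ [a,b,c,d]) [w,x,y,z]) with h | h <;> rw [h]
  · rw [PySem.Chars.endswith_iff] at h
    have h2 : [a,b,c,d] <:+ s ++ [a,b,c,d] := List.suffix_append s [a,b,c,d]
    have h3 := List.suffix_of_suffix_length_le h h2 (by simp)
    have h4 := h3.eq_of_length (by simp)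
    simp [h4]
  · symm; rw [Bool.eq_false_iff]; intro hbe
    have he : [a,b,c,d] = [w,x,y,z] := by simpa using hbe
    rw [Bool.eq_false_iff, Ne, PySem.Chars.endswith_iff] at h
    exact h (he ▸ List.suffix_append s [a,b,c,d])

theorem pv_slice_to_neg4 (s : List Char) (a b c d : Char) :
    PySem.List.slice (s ++ [a,b,c,d]) none (some (-4)) = s := by
  rw [PySem.List.slice_to_neg_ofNat _ 4 (by omega)]; simp

theorem pv_slice_from_len (s t : List Char) :
    PySem.List.slice (s ++ t) (some (s.length : Int)) none = t := by
  rw [PySem.List.slice_from_natCast]; simp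

-- startswith ['X'] on a cons is a head test
theorem pv_starts_cons (c : Char) (rest : List Char) :
    PySem.Chars.startswith (c :: rest) ['X'] = (c == 'X') := by
  rcases Bool.eq_false_or_eq_true (c == 'X') with h | h <;> rw [h]
  · have hc : c = 'X' := by simpa using h
    subst hc
    exact (PySem.Chars.startswith_iff ('X' :: rest) ['X']).mpr ((List.cons_prefix_cons).mpr ⟨rfl, List.nil_prefix⟩)
  · rw [Bool.eq_false_iff, Ne, PySem.Chars.startswith_iff, List.cons_prefix_cons]
    intro hcc
    exact absurd hcc.1.symm (by simpa using h)

-- B's p[0] == 'X' test equals A's startswith test on nonempty p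
theorem pv_get0_eq_starts (p : List Char) (hp : p ≠ []) :
    (PySem.List.pyGet? p 0 == some 'X') = PySem.Chars.startswith p ['X'] := by
  rcases p with _ | ⟨c, rest⟩
  · simp at hp
  · rw [pv_starts_cons]
    simp [PySem.List.pyGet?, PySem.List.pyIdx?]

-- startswith ['X'] on a nonempty list only depends on the head
theorem pv_starts_append (s t : List Char) (hs : s ≠ []) :
    PySem.Chars.startswith (s ++ t) ['X'] = PySem.Chars.startswith s ['X'] := by
  rcases s with _ | ⟨c, rest⟩
  · simp at hs
  · rw [List.cons_append, pv_starts_cons, pv_starts_cons]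

-- the matched-suffix case of pvCoreB, fully evaluated
theorem pv_coreB_matched (s : List Char) (a b c d : Char)
    (hmem : PySem.Set.contains pvZFiats [a,b,c,d] = true) :
    pvCoreB (s ++ [a,b,c,d]) =
      (if PySem.Chars.startswith s ['X'] && decide (1 < s.length) then s.tail else s)
        ++ [b,c,d] := by
  have hlen4 : decide (4 ≤ ((s ++ [a,b,c,d]).length : Int)) = true := by simp
  have hslice : PySem.List.slice (s ++ [a,b,c,d])
      (some (((s ++ [a,b,c,d]).length : Int) - 4)) none = [a,b,c,d] := by
    have he : (((s ++ [a,b,c,d]).length : Int) - 4) = (s.length : Int) := by simp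
    rw [he, pv_slice_from_len]
  simp only [pvCoreB, hlen4, hslice, hmem, Bool.and_true, if_true]
  by_cases hx : (PySem.Chars.startswith (s ++ [a,b,c,d]) ['X'] && decide (1 < s.length)) = true
  · -- X-stripped: drop = {s.length, 0}
    simp only [Bool.and_eq_true, decide_eq_true_eq] at hx
    obtain ⟨hxs0, hs1⟩ := hx
    have hg : ((PySem.List.pyGet? (s ++ [a,b,c,d]) 0 == some 'X')
        && decide (1 < ((s ++ [a,b,c,d]).length : Int) - 4)) = true := by
      rw [pv_get0_eq_starts _ (by simp), hxs0]
      simp; omega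
    rw [hg, if_pos rfl]
    rcases s with _ | ⟨x0, s'⟩
    · simp at hs1
    have hxs : PySem.Chars.startswith (x0 :: s') ['X'] = true := by
      rw [← pv_starts_append (x0 :: s') [a,b,c,d] (by simp)]; exact hxs0
    have hm : (((x0 :: s' ++ [a,b,c,d]).length : Int) - 4) = ((s'.length : Int) + 1) := by
      simp; omega
    rw [hm]
    have hcontains : ∀ y : Int,
        y ∈ (PySem.Set.add (PySem.Set.add PySem.Set.empty ((s'.length : Int) + 1)) 0 : PySem.Set Int)
          ↔ (y = (s'.length : Int) + 1 ∨ y = 0) := fun y =>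
      pv_mem_double _ y (by positivity)
    rw [hxs]
    simp only [hs1, decide_true, Bool.and_self, if_true, List.tail_cons, List.cons_append]
    rw [show pvJoinB (PySem.Set.add (PySem.Set.add PySem.Set.empty ((s'.length : Int) + 1)) 0)
          0 (x0 :: (s' ++ [a,b,c,d]))
        = pvJoinB (PySem.Set.add (PySem.Set.add PySem.Set.empty ((s'.length : Int) + 1)) 0)
          1 (s' ++ [a,b,c,d]) from by
      simp [pvJoinB]]
    rw [pvJoinB_dropZ _ a b c d s' 1
      (fun j hj hne => by rw [hcontains]; push_cast at hne ⊢; omega)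
      (by rw [hcontains]; left; push_cast; ring)]
  · -- no X strip: drop = {s.length}
    replace hx : (PySem.Chars.startswith (s ++ [a,b,c,d]) ['X'] && decide (1 < s.length)) = false :=
      Bool.eq_false_iff.mpr hx
    rw [Bool.eq_false_iff] at hx
    have hg : ((PySem.List.pyGet? (s ++ [a,b,c,d]) 0 == some 'X')
        && decide (1 < ((s ++ [a,b,c,d]).length : Int) - 4)) = false := by
      rw [pv_get0_eq_starts _ (by simp)]
      rw [Bool.eq_false_iff]; intro hc
      apply hx; simp at hc ⊢
      exact ⟨hc.1, by omega⟩
    rw [hg, if_neg (by simp)]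
    have hxs : (PySem.Chars.startswith s ['X'] && decide (1 < s.length)) = false := by
      rw [Bool.eq_false_iff]; intro hc
      apply hx
      simp only [Bool.and_eq_true, decide_eq_true_eq] at hc ⊢
      refine ⟨?_, hc.2⟩
      rw [pv_starts_append s [a,b,c,d] (by rintro rfl; simp at hc)]
      exact hc.1
    rw [hxs]
    simp only [Bool.false_eq_true, if_false]
    have hm : (((s ++ [a,b,c,d]).length : Int) - 4) = ((s.length : Nat) : Int) := by simp
    rw [hm, pvJoinB_dropZ _ a b c d s 0
      (fun j hj hne => by rw [pv_mem_single]; push_cast at hne ⊢; omega)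
      (by rw [pv_mem_single]; push_cast; ring)]

-- A's loop over the six suffixes equals B's drop-set pass, on every char list
theorem pv_core_eq (q : List Char) : pvLoopA q pvFiatsA = pvCoreB q := by
  by_cases hlen : 4 ≤ q.length
  · obtain ⟨s, t, hq, ht⟩ : ∃ s t, q = s ++ t ∧ t.length = 4 :=
      ⟨q.take (q.length - 4), q.drop (q.length - 4), (List.take_append_drop _ _).symm, by simp; omega⟩
    rcases t with _ | ⟨a, _ | ⟨b, _ | ⟨c, _ | ⟨d, _ | _⟩⟩⟩⟩ <;> simp at ht
    subst hq
    by_cases hmem : PySem.Set.contains pvZFiats [a,b,c,d] = true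
    · -- matched: both delete the Z (and possibly the leading X)
      rw [pv_coreB_matched s a b c d hmem]
      have hmem' : [a,b,c,d] = ['Z','U','S','D'] ∨ [a,b,c,d] = ['Z','E','U','R'] ∨
          [a,b,c,d] = ['Z','G','B','P'] ∨ [a,b,c,d] = ['Z','J','P','Y'] ∨
          [a,b,c,d] = ['Z','C','A','D'] ∨ [a,b,c,d] = ['Z','A','U','D'] := by
        revert hmem
        simp [pvZFiats, PySem.Set.contains, PySem.Set.ofList, PySem.Set.add]
      rcases hmem' with h | h | h | h | h | h <;>
        (obtain ⟨rfl, rfl, rfl, rfl⟩ : _ ∧ _ ∧ _ ∧ _ := by simpa using h) <;>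
        simp only [pvLoopA, pvFiatsA, pv_ends4, List.length_cons, List.length_nil] <;>
        norm_num <;>
        simp [pv_slice_to_neg4, PySem.List.slice_from_one]
    · -- no fiat suffix: both fall through to the X-strip fallback
      have hmemf : PySem.Set.contains pvZFiats [a,b,c,d] = false := Bool.eq_false_iff.mpr hmem
      have hne : ∀ fiat ∈ pvFiatsA, ([a,b,c,d] == fiat) = false := by
        intro fiat hf
        rw [Bool.eq_false_iff]
        intro hbe
        apply hmem
        have he : [a,b,c,d] = fiat := by simpa using hbe
        subst he
        revert hf
        simp [pvZFiats, pvFiatsA, PySem.Set.contains, PySem.Set.ofList, PySem.Set.add]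
      have hA : pvLoopA (s ++ [a,b,c,d]) pvFiatsA =
          (if PySem.Chars.startswith (s ++ [a,b,c,d]) ['X']
              && decide (3 < (s ++ [a,b,c,d]).length) then
            PySem.List.slice (s ++ [a,b,c,d]) (some 1) none
          else (s ++ [a,b,c,d])) := by
        simp only [pvLoopA, pvFiatsA, pv_ends4,
          hne ['Z','U','S','D'] (by simp [pvFiatsA]), hne ['Z','E','U','R'] (by simp [pvFiatsA]),
          hne ['Z','G','B','P'] (by simp [pvFiatsA]), hne ['Z','J','P','Y'] (by simp [pvFiatsA]),
          hne ['Z','C','A','D'] (by simp [pvFiatsA]), hne ['Z','A','U','D'] (by simp [pvFiatsA]),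
          Bool.false_eq_true, if_false]
      rw [hA]
      have hslice : PySem.List.slice (s ++ [a,b,c,d])
          (some (((s ++ [a,b,c,d]).length : Int) - 4)) none = [a,b,c,d] := by
        have he : (((s ++ [a,b,c,d]).length : Int) - 4) = (s.length : Int) := by simp
        rw [he, pv_slice_from_len]
      simp only [pvCoreB, hslice, hmemf, Bool.and_false, Bool.false_eq_true, if_false]
      have h3 : decide (3 < ((s ++ [a,b,c,d]).length : Int)) = true := by simp; omega
      have h3' : decide (3 < (s ++ [a,b,c,d]).length) = true := by simp
      rw [h3, h3', pv_get0_eq_starts _ (by simp), Bool.true_and, Bool.and_true]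
      by_cases hxs : PySem.Chars.startswith (s ++ [a,b,c,d]) ['X'] = true
      · rw [hxs, if_pos rfl, if_pos rfl, PySem.List.slice_from_one]
        rcases s with _ | ⟨x0, s'⟩
        · -- p = [a,b,c,d] itself starting with X
          rw [show ([] : List Char) ++ [a,b,c,d] = a :: [b,c,d] from rfl]
          rw [show pvJoinB (PySem.Set.add PySem.Set.empty 0) 0 (a :: [b,c,d])
              = pvJoinB (PySem.Set.add PySem.Set.empty 0) 1 [b,c,d] from by
            simp [pvJoinB]]
          rw [pvJoinB_id _ _ 1 (fun j hj => by rw [pv_mem_single]; omega)]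
          rfl
        · rw [show (x0 :: s') ++ [a,b,c,d] = x0 :: (s' ++ [a,b,c,d]) from rfl]
          rw [show pvJoinB (PySem.Set.add PySem.Set.empty 0) 0 (x0 :: (s' ++ [a,b,c,d]))
              = pvJoinB (PySem.Set.add PySem.Set.empty 0) 1 (s' ++ [a,b,c,d]) from by
            simp [pvJoinB]]
          rw [pvJoinB_id _ _ 1 (fun j hj => by rw [pv_mem_single]; omega)]
          rfl
      · have hxf : PySem.Chars.startswith (s ++ [a,b,c,d]) ['X'] = false := Bool.eq_false_iff.mpr hxs
        rw [hxf]
        simp only [Bool.false_eq_true, if_false]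
        rw [pvJoinB_id _ _ 0 (fun j hj => by simp [PySem.Set.empty])]
  · -- short input: A's endswith all fail by length, B's conditions all fail too
    have hef : ∀ (fiat : List Char), fiat.length = 4 → PySem.Chars.endswith q fiat = false := by
      intro fiat hf
      rw [Bool.eq_false_iff, Ne, PySem.Chars.endswith_iff]
      intro hs
      have := hs.length_le
      omega
    simp only [pvFiatsA, pvLoopA, hef ['Z','U','S','D'] rfl, hef ['Z','E','U','R'] rfl,
      hef ['Z','G','B','P'] rfl, hef ['Z','J','P','Y'] rfl, hef ['Z','C','A','D'] rfl,
      hef ['Z','A','U','D'] rfl, Bool.false_eq_true, if_false]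
    have h4 : decide (4 ≤ ((q.length : Int))) = false := by simp; omega
    have h3 : decide (3 < ((q.length : Int))) = false := by simp; omega
    have h3' : (PySem.Chars.startswith q ['X'] && decide (3 < q.length)) = false := by
      simp; omega
    simp only [pvCoreB, h4, h3, h3', Bool.false_and, Bool.false_eq_true, if_false]
    rw [pvJoinB_id _ _ 0 (fun j hj => by simp [PySem.Set.empty])]

-- ===== VERDICT =====
theorem normalize_pair_py_spec : Claim_equal_normalize_pair_py := by
  intro pair _
  unfold Spec_normalize_pair_py normalize_pair_py normalize_pair_py_alt
  rw [pv_core_eq]
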